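-- pv_equiv track=rewrite | github.com/Lokki-ki-ki/Text_Marker | dataeng.py | shortforms
-- ===== SOURCE A (Python) =====
-- def shortforms(correct_text):
--     collections = {'u':'you', 'b':'B'}
--     num_of_error=0
--     splitted_text=correct_text.split()
--     for word in splitted_text:
--         if word in collections.keys():
--             num_of_error += 1
--     return num_of_error
-- ===== SOURCE B (Python) =====
-- def shortforms(correct_text):
--     freq = {}
--     for w in correct_text.split():
--         freq[w] = freq.get(w, 0) + 1
--     return sum(freq.get(k, 0) for k in ('u', 'b'))
-- ===== Notes on version B (the rewrite author's own statement) =====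
-- stated objective: alternative
-- what changed: B builds a full word-frequency dictionary in one pass and then sums the counts of the two shortform keys, instead of testing each word for dict-key membership and incrementing a counter.
import Mathlib
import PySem

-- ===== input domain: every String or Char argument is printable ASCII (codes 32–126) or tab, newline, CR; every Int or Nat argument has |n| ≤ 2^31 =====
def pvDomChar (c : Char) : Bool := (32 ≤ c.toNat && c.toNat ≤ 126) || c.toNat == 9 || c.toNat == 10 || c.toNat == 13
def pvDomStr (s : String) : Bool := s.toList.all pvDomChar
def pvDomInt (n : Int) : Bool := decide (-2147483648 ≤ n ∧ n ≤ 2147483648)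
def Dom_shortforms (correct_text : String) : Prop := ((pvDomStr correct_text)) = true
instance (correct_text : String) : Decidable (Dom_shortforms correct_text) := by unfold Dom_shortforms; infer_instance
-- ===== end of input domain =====

-- B replaces A's per-word key-membership counter with a one-pass word-frequency dictionary
-- summed over the two shortform keys (objective: alternative decomposition, same cost).

-- ===== PORT A =====
def shortforms (correct_text : String) : Int :=
  let collections : PySem.Dict String String := PySem.Dict.ofList [("u", "you"), ("b", "B")]
  let splitted_text := PySem.Str.split₀ correct_text
  splitted_text.foldl (fun num_of_error word =>
    if collections.keys.contains word then num_of_error + 1 else num_of_error) 0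

-- ===== PORT B =====
def shortforms_alt (correct_text : String) : Int :=
  let freq : PySem.Dict String Int :=
    (PySem.Str.split₀ correct_text).foldl (fun d w => d.insert w (d.getD w 0 + 1)) PySem.Dict.empty
  (["u", "b"]).foldl (fun s k => s + freq.getD k 0) 0

-- ===== PRECONDITION & SPEC =====
def Spec_shortforms (correct_text : String) (out : Int) : Prop := out = shortforms_alt correct_text
instance (correct_text : String) (out : Int) : Decidable (Spec_shortforms correct_text out) := by unfold Spec_shortforms; infer_instance

-- ===== CLAIM (what is proved, stated in full; the proofs are below) =====
def Claim_equal_shortforms : Prop := ∀ (correct_text : String), Dom_shortforms correct_text → Spec_shortforms correct_text (shortforms correct_text)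

-- ===== LEMMAS AND PROOFS =====
theorem shortforms_foldA (l : List String) (n : Int) :
    l.foldl (fun num_of_error word =>
      if (["u", "b"] : List String).contains word then num_of_error + 1 else num_of_error) n
      = n + l.count "u" + l.count "b" := by
  induction l generalizing n with
  | nil => simp
  | cons w t ih =>
    rw [List.foldl_cons, List.count_cons, List.count_cons, ih]
    by_cases hu : w = "u"
    · subst hu
      rw [if_pos (by decide), if_pos (by decide), if_neg (by decide)]
      push_cast; ring
    · by_cases hb : w = "b"
      · subst hb
        rw [if_pos (by decide), if_neg (by decide), if_pos (by decide)]
        push_cast; ring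
      · rw [if_neg (by simp [hu, hb]), if_neg (by simp [hu]), if_neg (by simp [hb])]
        push_cast; ring

-- ===== VERDICT (by name: the statement is the Claim_ definition above) =====
theorem shortforms_spec : Claim_equal_shortforms := by
  intro s _
  unfold Spec_shortforms shortforms shortforms_alt
  have hkeys : (PySem.Dict.ofList [("u", "you"), ("b", "B")] : PySem.Dict String String).keys
      = ["u", "b"] := by decide
  simp only [hkeys, List.foldl_cons, List.foldl_nil,
    PySem.Dict.getD_foldl_insert_add_one]
  rw [shortforms_foldA]
  simp [PySem.Dict.getD, PySem.Dict.empty, PySem.Dict.get?]
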